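-- pv_equiv track=rewrite | github.com/alient12/neuroscience-lab2 | functions_EMG_2025.py | min_zero_sequences
-- ===== SOURCE A (Python) =====
-- def min_zero_sequences(lst):
--     lengths = set()
--     count = 0
--
--     for x in lst:
--         if x == 0:
--             count += 1
--         else:
--             if count >= 3:
--                 lengths.add(count)
--             count = 0
--
--     # gérer la fin
--     if count >= 3:
--         lengths.add(count)
--
--     return min(lengths)
-- ===== SOURCE B (Python) =====
-- def min_zero_sequences(lst):
--     n = len(lst)
--     bounds = [-1] + [i for i, x in enumerate(lst) if x != 0] + [n]
--     return min(b - a - 1 for a, b in zip(bounds, bounds[1:]) if b - a - 1 >= 3)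
-- ===== Notes on version B (the rewrite author's own statement) =====
-- stated objective: alternative
-- what changed: Instead of a stateful counter+set scan with an end-of-list fixup, B computes the nonzero positions once and reads each maximal zero-run length as the gap between consecutive nonzero positions (with -1 and len sentinels), then takes the min of the gaps >= 3.
import Mathlib
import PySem

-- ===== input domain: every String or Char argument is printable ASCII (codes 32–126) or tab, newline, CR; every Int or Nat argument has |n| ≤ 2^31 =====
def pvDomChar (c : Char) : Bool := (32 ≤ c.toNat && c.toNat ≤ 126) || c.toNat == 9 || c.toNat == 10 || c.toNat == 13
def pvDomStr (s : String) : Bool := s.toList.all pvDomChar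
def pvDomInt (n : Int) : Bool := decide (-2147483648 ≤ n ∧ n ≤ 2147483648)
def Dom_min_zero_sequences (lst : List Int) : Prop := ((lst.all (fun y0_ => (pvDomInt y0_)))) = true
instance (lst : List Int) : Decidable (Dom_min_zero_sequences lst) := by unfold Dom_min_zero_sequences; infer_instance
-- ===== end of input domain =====

-- B replaces A's counter+set scan (with end-of-list fixup) by gaps between consecutive
-- nonzero positions (sentinels -1 and len); alternative decomposition, same O(n) cost.

-- ===== PORT A =====
def min_zero_sequences (lst : List Int) : Int :=
  let st := lst.foldl
    (fun (st : PySem.Set Int × Int) x =>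
      if x = 0 then (st.1, st.2 + 1)
      else (if st.2 ≥ 3 then PySem.Set.add st.1 st.2 else st.1, 0))
    (PySem.Set.empty, 0)
  let lengths := if st.2 ≥ 3 then PySem.Set.add st.1 st.2 else st.1
  match PySem.List.min? lengths (fun v => v) with
  | some v => v
  | none => 0   -- Python: min(∅) raises ValueError; excluded by Pre_

-- ===== PORT B =====
def min_zero_sequences_alt (lst : List Int) : Int :=
  let n : Int := lst.length
  let bounds : List Int :=
    -1 :: (((PySem.List.enumerate lst).filter (fun p => p.2 != 0)).map (·.1) ++ [n])
  let gaps := (bounds.zip bounds.tail).filterMap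
    (fun p => if p.2 - p.1 - 1 ≥ 3 then some (p.2 - p.1 - 1) else none)
  match PySem.List.min? gaps (fun v => v) with
  | some v => v
  | none => 0   -- Python: min(empty generator) raises ValueError; excluded by Pre_

-- ===== PRECONDITION & SPEC =====
-- Pre_ excludes exactly the inputs with no run of ≥ 3 consecutive zeros: there A's
-- min(lengths) raises ValueError (B raises identically).
def Pre_min_zero_sequences (lst : List Int) : Prop :=
  ∃ i < lst.length, lst[i]? = some 0 ∧ lst[i + 1]? = some 0 ∧ lst[i + 2]? = some 0
instance (lst : List Int) : Decidable (Pre_min_zero_sequences lst) := by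
  unfold Pre_min_zero_sequences; infer_instance

def pvWitness_min_zero_sequences : List Int := ([0, 0, 0, 5, 0, 0, 0, 0])

def Spec_min_zero_sequences (lst : List Int) (out : Int) : Prop := out = min_zero_sequences_alt lst
instance (lst : List Int) (out : Int) : Decidable (Spec_min_zero_sequences lst out) := by unfold Spec_min_zero_sequences; infer_instance

-- ===== CLAIM (what is proved, stated in full; the proofs are below) =====
def Claim_equal_min_zero_sequences : Prop := ∀ (lst : List Int), Dom_min_zero_sequences lst → Pre_min_zero_sequences lst → Spec_min_zero_sequences lst (min_zero_sequences lst)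

-- ===== LEMMAS AND PROOFS =====

-- zero-run lengths of xs, starting with an open run already c long
def zrunsC (c : Int) : List Int → List Int
  | [] => [c]
  | x :: xs => if x = 0 then zrunsC (c + 1) xs else c :: zrunsC 0 xs

-- consecutive gaps: diffs a (b :: bs) = (b - a - 1) :: diffs b bs
def diffs (a : Int) : List Int → List Int
  | [] => []
  | b :: bs => (b - a - 1) :: diffs b bs

lemma zipWith_diffs (l : List Int) : ∀ (a : Int),
    List.zipWith (fun x y => y - x - 1) (a :: l) l = diffs a l := by
  induction l with
  | nil => intro a; rfl
  | cons b bs ih => intro a; simp only [List.zipWith_cons_cons, diffs, ih b]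

lemma zip_map_diffs (a : Int) (l : List Int) :
    (((a :: l).zip l).map (fun p => p.2 - p.1 - 1)) = diffs a l := by
  rw [List.zip, List.map_zipWith]
  exact zipWith_diffs l a

lemma diffs_main (xs : List Int) : ∀ (s c : Int),
    diffs (s - 1 - c)
      ((((PySem.List.enumerate xs s).filter (fun p => p.2 != 0)).map (·.1)) ++ [s + xs.length]) =
    zrunsC c xs := by
  induction xs with
  | nil => intro s c; simp [PySem.List.enumerate_nil, diffs, zrunsC]; ring
  | cons x xs ih =>
    intro s c
    rw [PySem.List.enumerate_cons]
    by_cases hx : x = 0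
    · subst hx
      simp only [zrunsC, List.filter_cons, List.length_cons,
        show ((0 : Int) != 0) = false by decide, Bool.false_eq_true, if_false]
      rw [show s + ((xs.length + 1 : Nat) : Int) = (s + 1) + (xs.length : Int) by
            push_cast; ring,
          show s - 1 - c = (s + 1) - 1 - (c + 1) by ring]
      exact ih (s + 1) (c + 1)
    · simp only [zrunsC, if_neg hx, List.filter_cons, List.length_cons,
        show (x != 0) = true by simp [hx], if_true, List.map_cons, List.cons_append, diffs]
      congr 1
      · ring
      · rw [show s + ((xs.length + 1 : Nat) : Int) = (s + 1) + (xs.length : Int) by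
              push_cast; ring]
        have h := ih (s + 1) 0
        rw [show (s + 1) - 1 - (0 : Int) = s by ring] at h
        exact h

-- membership in A's final set (fold + end-of-list fixup), generalized over the running state
lemma foldA_mem (xs : List Int) : ∀ (s : PySem.Set Int) (c v : Int),
    (v ∈ (if (xs.foldl
        (fun (st : PySem.Set Int × Int) x =>
          if x = 0 then (st.1, st.2 + 1)
          else (if st.2 ≥ 3 then PySem.Set.add st.1 st.2 else st.1, 0)) (s, c)).2 ≥ 3
      then PySem.Set.add
        (xs.foldl
          (fun (st : PySem.Set Int × Int) x =>
            if x = 0 then (st.1, st.2 + 1)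
            else (if st.2 ≥ 3 then PySem.Set.add st.1 st.2 else st.1, 0)) (s, c)).1
        (xs.foldl
          (fun (st : PySem.Set Int × Int) x =>
            if x = 0 then (st.1, st.2 + 1)
            else (if st.2 ≥ 3 then PySem.Set.add st.1 st.2 else st.1, 0)) (s, c)).2
      else (xs.foldl
          (fun (st : PySem.Set Int × Int) x =>
            if x = 0 then (st.1, st.2 + 1)
            else (if st.2 ≥ 3 then PySem.Set.add st.1 st.2 else st.1, 0)) (s, c)).1)) ↔
    (v ∈ s ∨ (3 ≤ v ∧ v ∈ zrunsC c xs)) := by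
  induction xs with
  | nil =>
    intro s c v
    simp only [List.foldl_nil, zrunsC, List.mem_singleton]
    split_ifs with h
    · rw [PySem.Set.mem_add]
      constructor
      · rintro (hs | rfl)
        · exact Or.inl hs
        · exact Or.inr ⟨by omega, rfl⟩
      · rintro (hs | ⟨_, rfl⟩)
        · exact Or.inl hs
        · exact Or.inr rfl
    · constructor
      · exact Or.inl
      · rintro (hs | ⟨h3, rfl⟩)
        · exact hs
        · omega
  | cons x xs ih =>
    intro s c v
    simp only [List.foldl_cons]
    by_cases hx : x = 0
    · simp only [hx, zrunsC]
      exact ih s (c + 1) v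
    · simp only [if_neg hx, zrunsC, List.mem_cons]
      rw [ih _ 0 v]
      split_ifs with h
      · rw [PySem.Set.mem_add]
        constructor
        · rintro ((hs | rfl) | hr)
          · exact Or.inl hs
          · exact Or.inr ⟨by omega, Or.inl rfl⟩
          · exact Or.inr ⟨hr.1, Or.inr hr.2⟩
        · rintro (hs | ⟨h3, rfl | hm⟩)
          · exact Or.inl (Or.inl hs)
          · exact Or.inl (Or.inr rfl)
          · exact Or.inr ⟨h3, hm⟩
      · constructor
        · rintro (hs | hr)
          · exact Or.inl hs
          · exact Or.inr ⟨hr.1, Or.inr hr.2⟩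
        · rintro (hs | ⟨h3, rfl | hm⟩)
          · exact Or.inl hs
          · omega
          · exact Or.inr ⟨h3, hm⟩

lemma min?_congr_mem (l1 l2 : List Int) (h : ∀ v, v ∈ l1 ↔ v ∈ l2) :
    PySem.List.min? l1 (fun v => v) = PySem.List.min? l2 (fun v => v) := by
  cases hm : PySem.List.min? l1 (fun v => v) with
  | none =>
    rw [PySem.List.min?_eq_none_iff] at hm
    subst hm
    symm
    rw [PySem.List.min?_eq_none_iff]
    rw [List.eq_nil_iff_forall_not_mem]
    intro v hv
    exact (List.not_mem_nil (a := v)) ((h v).mpr hv)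
  | some m =>
    have hmem : m ∈ l2 := (h m).mp (PySem.List.min?_mem hm)
    have hmin := PySem.List.min?_isMin hm
    cases hm2 : PySem.List.min? l2 (fun v => v) with
    | none =>
      rw [PySem.List.min?_eq_none_iff] at hm2
      subst hm2; cases hmem
    | some m' =>
      have h1 : m ≤ m' := hmin m' ((h m').mpr (PySem.List.min?_mem hm2))
      have h2 : m' ≤ m := PySem.List.min?_isMin hm2 m hmem
      rw [le_antisymm h1 h2]

lemma gaps_mem (lst : List Int) (v : Int) :
    (v ∈ (((-1 :: ((((PySem.List.enumerate lst).filter (fun p => p.2 != 0)).map (·.1)) ++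
          [(lst.length : Int)])).zip
        (((PySem.List.enumerate lst).filter (fun p => p.2 != 0)).map (·.1) ++
          [(lst.length : Int)])).filterMap
      (fun p => if p.2 - p.1 - 1 ≥ 3 then some (p.2 - p.1 - 1) else none))) ↔
    (3 ≤ v ∧ v ∈ zrunsC 0 lst) := by
  have hd : ((((-1 : Int) :: (((PySem.List.enumerate lst).filter (fun p => p.2 != 0)).map (·.1) ++
      [(lst.length : Int)])).zip
      ((((PySem.List.enumerate lst).filter (fun p => p.2 != 0)).map (·.1)) ++
      [(lst.length : Int)])).map (fun p => p.2 - p.1 - 1)) =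
      zrunsC 0 lst := by
    rw [zip_map_diffs]
    have := diffs_main lst 0 0
    simpa using this
  have hrw : (((-1 :: ((((PySem.List.enumerate lst).filter (fun p => p.2 != 0)).map (·.1)) ++
          [(lst.length : Int)])).zip
        (((PySem.List.enumerate lst).filter (fun p => p.2 != 0)).map (·.1) ++
          [(lst.length : Int)])).filterMap
      (fun p => if p.2 - p.1 - 1 ≥ 3 then some (p.2 - p.1 - 1) else none)) =
      (zrunsC 0 lst).filterMap (fun d => if d ≥ 3 then some d else none) := by
    rw [← hd, List.filterMap_map]
    rfl
  rw [hrw]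
  simp only [List.mem_filterMap]
  constructor
  · rintro ⟨d, hd1, hd2⟩
    by_cases h3 : d ≥ 3
    · rw [if_pos h3] at hd2
      cases hd2
      exact ⟨h3, hd1⟩
    · rw [if_neg h3] at hd2
      cases hd2
  · rintro ⟨h3, hm⟩
    exact ⟨v, hm, by simp [h3]⟩

-- ===== VERDICT (by name: the statement is the Claim_ definition above) =====
theorem min_zero_sequences_spec : Claim_equal_min_zero_sequences := by
  intro lst _ _
  unfold Spec_min_zero_sequences
  simp only [min_zero_sequences, min_zero_sequences_alt, List.tail_cons]
  rw [min?_congr_mem _ _ (fun v =>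
    ((foldA_mem lst PySem.Set.empty 0 v).trans (by simp [PySem.Set.empty])).trans
      (gaps_mem lst v).symm)]
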